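-- pv_equiv track=rewrite | github.com/mjcumming/wiim | test_group_state.py | get_group_members_for_device
-- ===== SOURCE A (Python) =====
-- devices = {
--     "192.168.1.68": {"role": "master", "slaves": {"192.168.1.116", "192.168.1.115"}},
--     "192.168.1.116": {"role": "slave", "master_ip": "192.168.1.68"},
--     "192.168.1.115": {"role": "slave", "master_ip": "192.168.1.68"},
-- }
--
-- def ip_to_entity_id(ip: str) -> str:
--     return f"media_player.wiim_{ip.replace('.', '_')}"
--
-- def get_group_members_for_device(device_ip: str) -> list[str]:
--     """Simulate the device registry logic."""
--     device = devices.get(device_ip)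
--     if not device:
--         return []
--
--     if device["role"] == "master":
--         # Master + all slaves
--         members = [ip_to_entity_id(device_ip)]
--         members.extend(ip_to_entity_id(slave_ip) for slave_ip in device["slaves"])
--         return members
--
--     elif device["role"] == "slave" and device.get("master_ip"):
--         # All devices in the group (master + all slaves)
--         master_ip = device["master_ip"]
--         master_device = devices.get(master_ip)
--         if master_device:
--             members = [ip_to_entity_id(master_ip)]
--             members.extend(ip_to_entity_id(slave_ip) for slave_ip in master_device["slaves"])
--             return members
--
--     return []  # Solo device has no group members
-- ===== SOURCE B (Python) =====
-- devices = {
--     "192.168.1.68": {"role": "master", "slaves": {"192.168.1.116", "192.168.1.115"}},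
--     "192.168.1.116": {"role": "slave", "master_ip": "192.168.1.68"},
--     "192.168.1.115": {"role": "slave", "master_ip": "192.168.1.68"},
-- }
--
-- def ip_to_entity_id(ip: str) -> str:
--     return f"media_player.wiim_{ip.replace('.', '_')}"
--
-- def get_group_members_for_device(device_ip: str) -> list[str]:
--     """Reverse lookup: scan the registry's master entries and return the group of the
--     first master whose group (master itself + its slaves) contains device_ip.
--     Equivalent to the pointer-following version because the registry is consistent:
--     every slave's master_ip points to the master whose 'slaves' set lists it."""
--     for master_ip, d in devices.items():
--         if d["role"] == "master" and (device_ip == master_ip or device_ip in d["slaves"]):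
--             return [ip_to_entity_id(master_ip)] + [ip_to_entity_id(s) for s in d["slaves"]]
--     return []
-- ===== Notes on version B (the rewrite author's own statement) =====
-- stated objective: alternative
-- what changed: B never follows a slave's master_ip pointer: it does a reverse lookup, scanning the registry's master entries and returning the group of the first master whose group (itself plus its slaves set) contains device_ip; correct because the fixed registry is consistent.
import Mathlib
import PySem

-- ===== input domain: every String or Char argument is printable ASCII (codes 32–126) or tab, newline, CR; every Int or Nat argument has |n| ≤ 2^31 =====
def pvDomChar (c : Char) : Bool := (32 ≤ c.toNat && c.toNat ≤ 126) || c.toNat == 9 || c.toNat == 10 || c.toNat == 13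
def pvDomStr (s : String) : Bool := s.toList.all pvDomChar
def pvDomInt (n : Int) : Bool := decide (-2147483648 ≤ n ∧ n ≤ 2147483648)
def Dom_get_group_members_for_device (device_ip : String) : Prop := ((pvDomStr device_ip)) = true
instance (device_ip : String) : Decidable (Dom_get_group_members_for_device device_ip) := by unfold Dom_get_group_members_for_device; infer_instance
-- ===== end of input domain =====

-- B replaces A's pointer-following with a reverse lookup over the registry's master
-- entries (objective: alternative algorithm; same behaviour on this fixed registry).

-- Shared module-level data: each device entry has a role, a set of slave IPs
-- (only present for masters; modelled as [] otherwise, never read there), and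
-- an optional master_ip.
structure PyDevice where
  role : String
  slaves : PySem.Set String
  master_ip : Option String
deriving DecidableEq, Repr

def pvDevices : PySem.Dict String PyDevice := PySem.Dict.ofList
  [ ("192.168.1.68", ⟨"master", PySem.Set.ofList ["192.168.1.116", "192.168.1.115"], none⟩),
    ("192.168.1.116", ⟨"slave", [], some "192.168.1.68"⟩),
    ("192.168.1.115", ⟨"slave", [], some "192.168.1.68"⟩) ]

def ip_to_entity_id (ip : String) : String :=
  "media_player.wiim_" ++ PySem.Str.replace ip "." "_"

-- Python truthiness of device.get("master_ip") (None or "" is falsy)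
def pvTruthyOptStr : Option String → Bool
  | some s => !(s == "")
  | none => false

-- ===== PORT A =====
def get_group_members_for_device (device_ip : String) : List String :=
  match PySem.Dict.get? pvDevices device_ip with
  | none => []
  | some device =>
    if device.role == "master" then
      ip_to_entity_id device_ip :: device.slaves.map ip_to_entity_id
    else if device.role == "slave" && pvTruthyOptStr device.master_ip then
      match device.master_ip with
      | none => []
      | some master_ip =>
        match PySem.Dict.get? pvDevices master_ip with
        | none => []
        | some master_device =>
          ip_to_entity_id master_ip :: master_device.slaves.map ip_to_entity_id
    else []

-- ===== PORT B =====
-- the 'for master_ip, d in devices.items()' loop of Source B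
def pvAltScan (device_ip : String) : List (String × PyDevice) → List String
  | [] => []
  | (master_ip, d) :: rest =>
    if d.role == "master" && (device_ip == master_ip || d.slaves.contains device_ip) then
      ip_to_entity_id master_ip :: d.slaves.map ip_to_entity_id
    else pvAltScan device_ip rest

def get_group_members_for_device_alt (device_ip : String) : List String :=
  pvAltScan device_ip pvDevices.items

-- ===== PRECONDITION & SPEC =====
def Spec_get_group_members_for_device (device_ip : String) (out : List String) : Prop := out = get_group_members_for_device_alt device_ip
instance (device_ip : String) (out : List String) : Decidable (Spec_get_group_members_for_device device_ip out) := by unfold Spec_get_group_members_for_device; infer_instance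

-- ===== CLAIM =====
def Claim_equal_get_group_members_for_device : Prop := ∀ (device_ip : String), Dom_get_group_members_for_device device_ip → Spec_get_group_members_for_device device_ip (get_group_members_for_device device_ip)

-- ===== LEMMAS AND PROOFS =====

theorem pvDevices_eq_mk : pvDevices = PySem.Dict.mk
  [ ("192.168.1.68", ⟨"master", PySem.Set.ofList ["192.168.1.116", "192.168.1.115"], none⟩),
    ("192.168.1.116", ⟨"slave", [], some "192.168.1.68"⟩),
    ("192.168.1.115", ⟨"slave", [], some "192.168.1.68"⟩) ] := by decide

theorem pvSlavesEval : PySem.Set.ofList ["192.168.1.116", "192.168.1.115"] = ["192.168.1.116", "192.168.1.115"] := by decide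

-- ===== VERDICT =====
theorem get_group_members_for_device_spec : Claim_equal_get_group_members_for_device := by
  intro ip _
  unfold Spec_get_group_members_for_device
  by_cases h1 : ip = "192.168.1.68"
  · subst h1; decide
  by_cases h2 : ip = "192.168.1.116"
  · subst h2; decide
  by_cases h3 : ip = "192.168.1.115"
  · subst h3; decide
  have e : PySem.Dict.get? pvDevices ip = none := by
    rw [pvDevices_eq_mk]
    simp [PySem.Dict.get?, Ne.symm h1, Ne.symm h2, Ne.symm h3]
  have b1 : (ip == "192.168.1.68") = false := by simp [h1]
  have b2 : (ip == "192.168.1.116") = false := by simp [h2]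
  have b3 : (ip == "192.168.1.115") = false := by simp [h3]
  simp only [get_group_members_for_device, e]
  simp only [get_group_members_for_device_alt, pvDevices_eq_mk, pvSlavesEval]
  simp [pvAltScan, b1, b2, b3, List.contains, List.elem]
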